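-- pv_equiv track=rewrite | github.com/htsofie/phospho-idr | scripts/compile_morf_interfaces.py | extract_morf_positions
-- ===== SOURCE A (Python) =====
-- from typing import Optional, List, Dict
--
-- def extract_morf_positions(annotation_line: str, sequence: str) -> str:
--     """
--     Parse annotation line and convert '1' positions to range format.
--
--     Args:
--         annotation_line: String of 0, 1, - characters
--         sequence: Protein sequence (for potential future validation)
--
--     Returns:
--         Formatted string: [20-30,40,50-60] (1-indexed positions)
--     """
--     positions: List[int] = []
--
--     # Find all positions where character is '1' (1-indexed)
--     for i, char in enumerate(annotation_line, start=1):
--         if char == "1":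
--             positions.append(i)
--
--     if not positions:
--         return "[]"
--
--     # Group consecutive positions into ranges
--     ranges: List[str] = []
--     start = positions[0]
--     end = positions[0]
--
--     for i in range(1, len(positions)):
--         if positions[i] == end + 1:
--             # Consecutive, extend range
--             end = positions[i]
--         else:
--             # Gap found, save current range
--             if start == end:
--                 ranges.append(str(start))
--             else:
--                 ranges.append(f"{start}-{end}")
--             start = positions[i]
--             end = positions[i]
--
--     # Add last range
--     if start == end:
--         ranges.append(str(start))
--     else:
--         ranges.append(f"{start}-{end}")
--
--     return "[" + ",".join(ranges) + "]"
-- ===== SOURCE B (Python) =====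
-- import re
--
-- def extract_morf_positions(annotation_line: str, sequence: str) -> str:
--     parts = []
--     for m in re.finditer(r"1+", annotation_line):
--         s, e = m.start() + 1, m.end()
--         parts.append(str(s) if s == e else f"{s}-{e}")
--     return "[" + ",".join(parts) + "]"
-- ===== Notes on version B (the rewrite author's own statement) =====
-- stated objective: idiomatic
-- what changed: Replaces the two-pass build-positions-then-group-consecutive loops with re.finditer on r'1+', which yields each maximal run directly as a (start,end) range.
import Mathlib
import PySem

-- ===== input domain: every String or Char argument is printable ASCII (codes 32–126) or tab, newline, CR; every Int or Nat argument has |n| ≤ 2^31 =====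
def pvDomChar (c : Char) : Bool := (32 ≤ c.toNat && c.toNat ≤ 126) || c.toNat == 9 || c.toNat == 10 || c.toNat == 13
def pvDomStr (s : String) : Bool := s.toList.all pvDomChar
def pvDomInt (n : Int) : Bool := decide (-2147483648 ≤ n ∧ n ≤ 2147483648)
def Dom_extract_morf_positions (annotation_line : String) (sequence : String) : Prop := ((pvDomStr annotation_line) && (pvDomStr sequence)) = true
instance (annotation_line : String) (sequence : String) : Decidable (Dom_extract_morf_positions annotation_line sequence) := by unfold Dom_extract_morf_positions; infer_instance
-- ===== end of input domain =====

-- B replaces A's build-positions-then-group-consecutive loops by extracting maximal runs of '1'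
-- directly (re.finditer(r"1+")); return values are proved identical on all inputs.

-- ===== PORT A =====
-- str(n) / f"{start}-{end}" for the positive Nat positions
def pvFmt (s e : Nat) : String := if s = e then toString s else toString s ++ "-" ++ toString e

-- 'for i, char in enumerate(annotation_line, start=1): if char == "1": positions.append(i)'
def pvPositionsA : List Char → Nat → List Nat → List Nat
  | [], _, acc => acc
  | c :: cs, i, acc => pvPositionsA cs (i + 1) (if c = '1' then acc ++ [i] else acc)

-- 'for i in range(1, len(positions)): …' with state (start, end, ranges), then the final append
def pvGroupA : List Nat → Nat → Nat → List String → List String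
  | [], s, e, ranges => ranges ++ [pvFmt s e]
  | p :: rest, s, e, ranges =>
      if p = e + 1 then pvGroupA rest s p ranges
      else pvGroupA rest p p (ranges ++ [pvFmt s e])

def extract_morf_positions (annotation_line : String) (sequence : String) : String :=
  let positions := pvPositionsA annotation_line.toList 1 []
  match positions with
  | [] => "[]"
  | p :: rest => "[" ++ String.intercalate "," (pvGroupA rest p p []) ++ "]"

-- ===== PORT B =====
-- re.finditer(r"1+", s): the maximal runs of '1', as 1-indexed (start, end) pairs.
-- i = number of characters consumed so far; st = start of the run currently open, if any.
def pvRunsB : List Char → Nat → Option Nat → List (Nat × Nat)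
  | [], _, none => []
  | [], i, some s => [(s, i)]
  | c :: cs, i, st =>
      if c = '1' then pvRunsB cs (i + 1) (some (st.getD (i + 1)))
      else
        match st with
        | none => pvRunsB cs (i + 1) none
        | some s => (s, i) :: pvRunsB cs (i + 1) none

def extract_morf_positions_alt (annotation_line : String) (sequence : String) : String :=
  let parts := (pvRunsB annotation_line.toList 0 none).map (fun se => pvFmt se.1 se.2)
  "[" ++ String.intercalate "," parts ++ "]"

-- ===== PRECONDITION & SPEC =====
def Spec_extract_morf_positions (annotation_line : String) (sequence : String) (out : String) : Prop := out = extract_morf_positions_alt annotation_line sequence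
instance (annotation_line : String) (sequence : String) (out : String) : Decidable (Spec_extract_morf_positions annotation_line sequence out) := by unfold Spec_extract_morf_positions; infer_instance

-- ===== CLAIM (what is proved, stated in full; the proofs are below) =====
def Claim_equal_extract_morf_positions : Prop := ∀ (annotation_line : String) (sequence : String), Dom_extract_morf_positions annotation_line sequence → Spec_extract_morf_positions annotation_line sequence (extract_morf_positions annotation_line sequence)

-- ===== LEMMAS AND PROOFS =====

theorem pvPositionsA_acc (l : List Char) : ∀ (i : Nat) (acc : List Nat),
    pvPositionsA l i acc = acc ++ pvPositionsA l i [] := by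
  induction l with
  | nil => intro i acc; simp [pvPositionsA]
  | cons c cs ih =>
      intro i acc
      by_cases h : c = '1'
      · simp only [pvPositionsA, if_pos h, List.nil_append]
        rw [ih (i + 1) (acc ++ [i]), ih (i + 1) [i], List.append_assoc]
      · simp only [pvPositionsA, if_neg h]
        exact ih (i + 1) acc

theorem pvPositionsA_ge (l : List Char) : ∀ (m x : Nat), x ∈ pvPositionsA l m [] → m ≤ x := by
  induction l with
  | nil => intro m x hx; simp [pvPositionsA] at hx
  | cons c cs ih =>
      intro m x hx
      by_cases h : c = '1'
      · simp only [pvPositionsA, if_pos h, List.nil_append] at hx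
        rw [pvPositionsA_acc cs (m + 1) [m]] at hx
        rcases List.mem_append.mp hx with hx | hx
        · simp at hx; omega
        · exact Nat.le_of_succ_le (ih (m + 1) x hx)
      · simp only [pvPositionsA, if_neg h] at hx
        exact Nat.le_of_succ_le (ih (m + 1) x hx)

theorem pvGroupA_acc (ps : List Nat) : ∀ (s e : Nat) (ranges : List String),
    pvGroupA ps s e ranges = ranges ++ pvGroupA ps s e [] := by
  induction ps with
  | nil => intro s e r; simp [pvGroupA]
  | cons p rest ih =>
      intro s e r
      by_cases h : p = e + 1
      · simp only [pvGroupA, if_pos h]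
        exact ih s p r
      · simp only [pvGroupA, if_neg h, List.nil_append]
        rw [ih p p (r ++ [pvFmt s e]), ih p p [pvFmt s e], List.append_assoc]

-- the main correspondence: inside a run (G1) and outside a run (G2)
theorem pv_main (l : List Char) (n : Nat) :
    (∀ s, pvGroupA (pvPositionsA l (n + 1) []) s n [] =
        (pvRunsB l n (some s)).map (fun se => pvFmt se.1 se.2)) ∧
    ((match pvPositionsA l (n + 1) [] with
      | [] => ([] : List String)
      | p :: rest => pvGroupA rest p p []) =
        (pvRunsB l n none).map (fun se => pvFmt se.1 se.2)) := by
  induction l generalizing n with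
  | nil => simp [pvPositionsA, pvGroupA, pvRunsB]
  | cons c cs ih =>
      by_cases h : c = '1'
      · constructor
        · intro s
          simp only [pvPositionsA, if_pos h, List.nil_append, pvRunsB, if_pos h, Option.getD_some]
          rw [pvPositionsA_acc cs (n + 1 + 1) [n + 1], List.singleton_append]
          simp only [pvGroupA, if_pos rfl]
          exact (ih (n + 1)).1 s
        · simp only [pvPositionsA, if_pos h, List.nil_append, pvRunsB, if_pos h, Option.getD_none]
          rw [pvPositionsA_acc cs (n + 1 + 1) [n + 1], List.singleton_append]
          exact (ih (n + 1)).1 (n + 1)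
      · constructor
        · intro s
          simp only [pvPositionsA, if_neg h, pvRunsB, if_neg h, List.map_cons]
          have h2 := (ih (n + 1)).2
          cases hrest : pvPositionsA cs (n + 1 + 1) [] with
          | nil =>
              rw [hrest] at h2
              simp only [hrest, pvGroupA, List.nil_append, ← h2]
          | cons p r =>
              have hp : ¬ p = n + 1 := by
                have := pvPositionsA_ge cs (n + 1 + 1) p (by rw [hrest]; exact List.mem_cons_self)
                omega
              rw [hrest] at h2
              simp only [hrest, pvGroupA, if_neg hp, List.nil_append]
              rw [pvGroupA_acc r p p [pvFmt s n], ← h2, List.singleton_append]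
        · simp only [pvPositionsA, if_neg h, pvRunsB, if_neg h]
          exact (ih (n + 1)).2

-- ===== VERDICT (by name: the statement is the Claim_ definition above) =====
theorem extract_morf_positions_spec : Claim_equal_extract_morf_positions := by
  intro a seq _
  unfold Spec_extract_morf_positions extract_morf_positions extract_morf_positions_alt
  have h := (pv_main a.toList 0).2
  cases hpos : pvPositionsA a.toList 1 [] with
  | nil =>
      rw [hpos] at h
      simp only [hpos, ← h]
      rfl
  | cons p rest =>
      rw [hpos] at h
      simp only [hpos, ← h]
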